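-- pv_equiv track=rewrite | github.com/ptjung/aoc-2021 | entries/day03/main_fh.py | bit_sum
-- ===== SOURCE A (Python) =====
-- def bit_sum(bits):
--     s = 0
--     for b in bits:
--         if b == '0':
--             s -= 1
--         else:
--             s += 1
--     return s
-- ===== SOURCE B (Python) =====
-- def bit_sum(bits):
--     # closed form: +1 for each non-'0', -1 for each '0'  =>  total - 2*zeros
--     return len(bits) - 2 * bits.count('0')
-- ===== Notes on version B (the rewrite author's own statement) =====
-- stated objective: simpler
-- what changed: Replaces the per-element branch-and-accumulate loop by a closed form len(bits) - 2*bits.count('0'), since each non-'0' element contributes +1 and each '0' contributes -1.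
import Mathlib
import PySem

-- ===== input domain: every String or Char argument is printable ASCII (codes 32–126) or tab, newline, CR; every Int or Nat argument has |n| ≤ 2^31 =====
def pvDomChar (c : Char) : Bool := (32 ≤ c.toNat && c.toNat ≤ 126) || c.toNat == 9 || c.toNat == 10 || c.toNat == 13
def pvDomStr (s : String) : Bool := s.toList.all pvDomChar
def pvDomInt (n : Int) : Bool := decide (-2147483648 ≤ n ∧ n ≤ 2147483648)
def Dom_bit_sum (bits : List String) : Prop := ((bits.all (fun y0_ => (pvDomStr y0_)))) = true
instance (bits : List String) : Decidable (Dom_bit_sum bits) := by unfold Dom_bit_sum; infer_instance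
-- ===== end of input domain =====

-- ===== PORT A =====
def bit_sum (bits : List String) : Int :=
  bits.foldl (fun s b => if b == "0" then s - 1 else s + 1) 0

-- ===== PORT B =====
def bit_sum_alt (bits : List String) : Int :=
  (bits.length : Int) - 2 * (PySem.List.count bits "0" : Int)

-- ===== PRECONDITION & SPEC =====
def Spec_bit_sum (bits : List String) (out : Int) : Prop := out = bit_sum_alt bits
instance (bits : List String) (out : Int) : Decidable (Spec_bit_sum bits out) := by unfold Spec_bit_sum; infer_instance

-- ===== CLAIM (what is proved, stated in full; the proofs are below) =====
def Claim_equal_bit_sum : Prop := ∀ (bits : List String), Dom_bit_sum bits → Spec_bit_sum bits (bit_sum bits)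

-- ===== LEMMAS AND PROOFS =====

-- ===== VERDICT (by name: the statement is the Claim_ definition above) =====
theorem bit_sum_foldl (bits : List String) (s : Int) :
    bits.foldl (fun s b => if b == "0" then s - 1 else s + 1) s
      = s + (bits.length : Int) - 2 * (bits.count "0" : Int) := by
  induction bits generalizing s with
  | nil => simp
  | cons h t ih =>
    simp only [List.foldl, List.count_cons, List.length_cons, ih]
    by_cases hh : h = "0" <;> simp [hh] <;> ring

theorem bit_sum_spec : Claim_equal_bit_sum := by
  intro bits _
  unfold Spec_bit_sum bit_sum bit_sum_alt PySem.List.count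
  rw [bit_sum_foldl]
  ring
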